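-- pv_equiv track=rewrite | github.com/MIJI-H/CodingTest | 프로그래머스/2/17680. ［1차］ 캐시/［1차］ 캐시.py | solution
-- ===== SOURCE A (Python) =====
-- from collections import deque
--
-- def solution(cacheSize, cities):
--
--     cache = deque(maxlen=cacheSize)
--     total_time = 0
--
--     for city in cities:
--
--         city = city.lower()
--
--         if city in cache:
--
--             total_time += 1
--
--             cache.remove(city)
--             cache.append(city)
--         else:
--
--             total_time += 5
--
--             cache.append(city)
--
--     return total_time
-- ===== SOURCE B (Python) =====
-- def solution(cacheSize, cities):
--     # Different algorithm: no explicit cache structure is maintained. We record for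
--     # each (lowercased) city the index of its last access; an access is a hit iff
--     # the city was seen before and fewer than cacheSize distinct cities were
--     # accessed more recently (its LRU rank), since an LRU cache holds exactly the
--     # cacheSize most recently accessed distinct keys.
--     last = {}
--     total = 0
--     for i, city in enumerate(cities):
--         city = city.lower()
--         j = last.get(city)
--         if j is not None and sum(1 for v in last.values() if v > j) < cacheSize:
--             total += 1
--         else:
--             total += 5
--         last[city] = i
--     return total
-- ===== Notes on version B (the rewrite author's own statement) =====
-- stated objective: alternative
-- what changed: Replaces the explicit LRU deque (membership scan, remove, append, implicit eviction) by a last-access-timestamp dictionary: an access is a hit iff the city was seen and fewer than cacheSize distinct cities carry a more recent timestamp, so no cache structure or eviction is maintained.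
import Mathlib
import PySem

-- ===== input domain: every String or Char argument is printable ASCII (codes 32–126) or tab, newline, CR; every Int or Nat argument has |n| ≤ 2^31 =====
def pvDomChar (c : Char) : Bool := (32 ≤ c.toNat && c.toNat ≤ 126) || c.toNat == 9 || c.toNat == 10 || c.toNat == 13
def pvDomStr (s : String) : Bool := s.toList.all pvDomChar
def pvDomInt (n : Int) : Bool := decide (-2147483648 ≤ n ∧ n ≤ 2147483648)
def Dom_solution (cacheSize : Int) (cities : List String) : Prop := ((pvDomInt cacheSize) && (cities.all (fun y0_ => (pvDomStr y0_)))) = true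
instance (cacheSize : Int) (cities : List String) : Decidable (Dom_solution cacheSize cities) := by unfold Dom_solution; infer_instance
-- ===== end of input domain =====

-- B replaces A's explicit LRU deque by a last-access-timestamp dictionary: an access is a
-- hit iff fewer than cacheSize distinct cities were accessed more recently (alternative
-- algorithm, similar cost; on cacheSize < 0, outside Pre_, the Python A raises ValueError
-- from deque(maxlen=cacheSize) while the Python B happens to return 5 per access).

-- ===== PORT A =====
-- deque append with maxlen semantics (maxlen = k ≥ 0 on Pre_): pop from the left while too long
def pyAppendMax (k : Int) (l : List String) (c : String) : List String :=
  let l' := l ++ [c]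
  if (l'.length : Int) > k then l'.drop (l'.length - k.toNat) else l'

def solutionStep (k : Int) (st : List String × Int) (city : String) : List String × Int :=
  let c := PySem.Str.lower city
  if c ∈ st.1 then
    (pyAppendMax k (st.1.erase c) c, st.2 + 1)
  else
    (pyAppendMax k st.1 c, st.2 + 5)

def solution (cacheSize : Int) (cities : List String) : Int :=
  (cities.foldl (solutionStep cacheSize) ([], 0)).2

-- ===== PORT B =====
def solutionAltStep (k : Int) (st : PySem.Dict String Int × Int × Int) (city : String) :
    PySem.Dict String Int × Int × Int :=
  let c := PySem.Str.lower city
  let hit : Bool :=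
    match st.1.get? c with
    | some j => decide ((((st.1.values.filter (fun v => decide (j < v))).length : Int)) < k)
    | none => false
  (st.1.insert c st.2.2, st.2.1 + (if hit then 1 else 5), st.2.2 + 1)

def solution_alt (cacheSize : Int) (cities : List String) : Int :=
  (cities.foldl (solutionAltStep cacheSize) (PySem.Dict.mk [], 0, 0)).2.1

-- ===== PRECONDITION & SPEC =====
-- Pre_ excludes only cacheSize < 0, where Python A raises ValueError (deque(maxlen=negative)).
def Pre_solution (cacheSize : Int) (cities : List String) : Prop := 0 ≤ cacheSize
instance (cacheSize : Int) (cities : List String) : Decidable (Pre_solution cacheSize cities) := by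
  unfold Pre_solution; infer_instance

def pvWitness_solution : Int × List String := (3, ["Jeju", "Pangyo", "Seoul", "jeju", "LA"])

def Spec_solution (cacheSize : Int) (cities : List String) (out : Int) : Prop := out = solution_alt cacheSize cities
instance (cacheSize : Int) (cities : List String) (out : Int) : Decidable (Spec_solution cacheSize cities out) := by unfold Spec_solution; infer_instance

-- ===== CLAIM (what is proved, stated in full; the proofs are below) =====
def Claim_equal_solution : Prop := ∀ (cacheSize : Int) (cities : List String), Dom_solution cacheSize cities → Pre_solution cacheSize cities → Spec_solution cacheSize cities (solution cacheSize cities)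

-- ===== LEMMAS AND PROOFS =====

-- timestamps strictly decreasing: the values above j are exactly the prefix before j
lemma filter_gt_eq_take (ta tb : List Int) (j : Int)
    (hp : (ta ++ j :: tb).Pairwise (· > ·)) :
    (ta ++ j :: tb).filter (fun v => decide (j < v)) = ta := by
  rw [List.pairwise_append] at hp
  obtain ⟨hta, htb, hcross⟩ := hp
  rw [List.filter_append]
  have h1 : ta.filter (fun v => decide (j < v)) = ta := by
    rw [List.filter_eq_self]
    intro x hx
    simp only [decide_eq_true_eq]
    exact hcross x hx j (List.mem_cons_self)
  have h2 : (j :: tb).filter (fun v => decide (j < v)) = [] := by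
    rw [List.filter_eq_nil_iff]
    intro x hx
    simp only [decide_eq_true_eq]
    rcases List.mem_cons.mp hx with rfl | hx
    · omega
    · have := (List.pairwise_cons.mp htb).1 x hx
      omega
  rw [h1, h2, List.append_nil]

-- membership in the cache window, for r = a ++ c :: b with c ∉ a
lemma mem_take_append_iff (a b : List String) (c : String) (hca : c ∉ a) (m : Nat) :
    c ∈ (a ++ c :: b).take m ↔ a.length < m := by
  constructor
  · intro h
    by_contra hm
    push Not at hm
    rw [List.take_append_of_le_length hm] at h
    exact hca (List.mem_of_mem_take h)
  · intro h
    rw [List.take_append]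
    obtain ⟨n, hn⟩ := Nat.exists_eq_succ_of_ne_zero (show m - a.length ≠ 0 by omega)
    rw [hn, List.take_succ_cons]
    simp

-- the deque append on a (full or not) window, as a window of the new recency list
lemma appendMax_eq (k : Int) (hk : 0 ≤ k) (r : List String) (c : String) :
    pyAppendMax k ((r.take k.toNat).reverse) c = ((c :: r).take k.toNat).reverse := by
  have hkk : (k.toNat : Int) = k := Int.toNat_of_nonneg hk
  unfold pyAppendMax
  simp only []
  by_cases hr : r.length < k.toNat
  · -- window not full: no drop
    have hlen : ((r.take k.toNat).reverse ++ [c]).length = r.length + 1 := by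
      simp
      omega
    rw [if_neg (by rw [hlen]; push_cast; omega)]
    have h1 : r.take k.toNat = r := List.take_of_length_le (le_of_lt hr)
    rw [h1]
    obtain ⟨n, hn⟩ := Nat.exists_eq_succ_of_ne_zero (show k.toNat ≠ 0 by omega)
    rw [hn, List.take_succ_cons, List.take_of_length_le (by omega)]
    simp
  · -- window full (length k): drop 1 from the left
    push Not at hr
    have hlen1 : (r.take k.toNat).length = k.toNat := by simp [Nat.min_eq_left hr]
    have hlen : ((r.take k.toNat).reverse ++ [c]).length = k.toNat + 1 := by simp [hlen1]
    rw [if_pos (by rw [hlen]; push_cast; omega), hlen]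
    have hd : k.toNat + 1 - k.toNat = 1 := by omega
    rw [hd]
    rcases Nat.eq_zero_or_pos k.toNat with h0 | hpos
    · simp [h0]
    · have h1 : 1 ≤ ((r.take k.toNat).reverse).length := by simp [hlen1]; omega
      rw [List.drop_append_of_le_length h1, List.drop_one, List.tail_reverse]
      obtain ⟨n, hn⟩ := Nat.exists_eq_succ_of_ne_zero (show k.toNat ≠ 0 by omega)
      rw [List.dropLast_eq_take, hlen1, List.take_take, hn, List.take_succ_cons]
      rw [Nat.min_eq_left (by omega)]
      simp

-- the deque hit update (remove + append) on the window, as a window of the new recency list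
lemma hitUpdate_eq (k : Int) (hk : 0 ≤ k) (a b : List String) (c : String)
    (hca : c ∉ a) (hcb : c ∉ b) (hhit : a.length < k.toNat) :
    pyAppendMax k ((((a ++ c :: b).take k.toNat).reverse).erase c) c
      = ((c :: (a ++ b)).take k.toNat).reverse := by
  have hkk : (k.toNat : Int) = k := Int.toNat_of_nonneg hk
  set t : List String := b.take (k.toNat - a.length - 1) with ht
  have hct : c ∉ t := fun h => hcb (List.mem_of_mem_take h)
  have htlen : t.length ≤ k.toNat - a.length - 1 := by simp [ht]
  have htake : (a ++ c :: b).take k.toNat = a ++ c :: t := by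
    rw [List.take_append, List.take_of_length_le (le_of_lt hhit)]
    obtain ⟨n, hn⟩ := Nat.exists_eq_succ_of_ne_zero (show k.toNat - a.length ≠ 0 by omega)
    rw [hn, List.take_succ_cons]
    have hnn : n = k.toNat - a.length - 1 := by omega
    rw [hnn, ← ht]
  have herase : (((a ++ c :: b).take k.toNat).reverse).erase c = t.reverse ++ a.reverse := by
    rw [htake]
    have hrev : (a ++ c :: t).reverse = t.reverse ++ (c :: a.reverse) := by simp
    rw [hrev, List.erase_append_right _ (by simpa using hct), List.erase_cons_head]
  rw [herase]
  unfold pyAppendMax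
  simp only []
  rw [if_neg (by simp; omega)]
  obtain ⟨n, hn⟩ := Nat.exists_eq_succ_of_ne_zero (show k.toNat ≠ 0 by omega)
  rw [hn, List.take_succ_cons, List.take_append]
  rw [List.take_of_length_le (by omega)]
  have hnn : n - a.length = k.toNat - a.length - 1 := by omega
  rw [hnn, ← ht]
  simp

-- main loop invariant: r is the ghost recency list (most recent first), ts its strictly
-- decreasing access timestamps; A's deque is the reversed k-window of r, B's dict holds
-- exactly (r, ts) as an unordered association.
lemma loop_eq (k : Int) (hk : 0 ≤ k) (cities : List String) :
    ∀ (r : List String) (ts : List Int) (d : PySem.Dict String Int) (tot i : Int),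
      d.items.Perm (r.zip ts) → r.length = ts.length → r.Nodup →
      ts.Pairwise (· > ·) → (∀ t ∈ ts, t < i) →
      (List.foldl (solutionStep k) ((r.take k.toNat).reverse, tot) cities).2
        = (List.foldl (solutionAltStep k) (d, tot, i) cities).2.1 := by
  have hkk : (k.toNat : Int) = k := Int.toNat_of_nonneg hk
  induction cities with
  | nil => intro r ts d tot i _ _ _ _ _; rfl
  | cons city rest ih =>
    intro r ts d tot i hperm hlen hnd hpw hlt
    rw [List.foldl_cons, List.foldl_cons]
    set c := PySem.Str.lower city with hc
    have hkeys : d.keys.Perm r := by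
      have h := hperm.map Prod.fst
      rwa [List.map_fst_zip (by omega)] at h
    have hknd : d.keys.Nodup := (hkeys.nodup_iff).mpr hnd
    by_cases hcr : c ∈ r
    · -- c already seen: r = a ++ c :: b with c ∉ a, c ∉ b
      obtain ⟨a, b, hab⟩ := List.append_of_mem hcr
      subst hab
      have hnd' : (c :: (a ++ b)).Nodup := List.nodup_middle.mp hnd
      have hcab : c ∉ a ++ b := (List.nodup_cons.mp hnd').1
      have hca : c ∉ a := fun h => hcab (List.mem_append.mpr (Or.inl h))
      have hcb : c ∉ b := fun h => hcab (List.mem_append.mpr (Or.inr h))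
      -- decompose the timestamps around c's last access time j
      have hlents : a.length < ts.length := by rw [← hlen]; simp
      obtain ⟨j, tb, hjtb⟩ := List.exists_cons_of_ne_nil
        (show ts.drop a.length ≠ [] by
          intro h
          have := congrArg List.length h
          simp at this
          omega)
      set ta := ts.take a.length with hta
      have hts : ts = ta ++ j :: tb := by rw [hta, ← hjtb]; exact (List.take_append_drop _ _).symm
      have htalen : ta.length = a.length := by simp [hta]; omega
      have htblen : tb.length = b.length := by
        have h2 := hlen
        rw [hts] at h2
        simp at h2
        omega
      have hzip : (a ++ c :: b).zip ts = a.zip ta ++ (c, j) :: b.zip tb := by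
        rw [hts, List.zip_append htalen.symm, List.zip_cons_cons]
      have hmem : (c, j) ∈ d.items := hperm.mem_iff.mpr (by rw [hzip]; simp)
      have hget : d.get? c = some j := PySem.Dict.get?_of_mem_items d hmem hknd
      -- c's LRU rank in B is the window position a.length
      have hvals : d.values.Perm ts := by
        have h := hperm.map Prod.snd
        rw [List.map_snd_zip (by omega)] at h
        exact h
      have hrank : ((d.values.filter (fun v => decide (j < v))).length : Int) = (a.length : Int) := by
        have h2 := (hvals.filter (fun v => decide (j < v))).length_eq
        rw [h2, hts, filter_gt_eq_take ta tb j (hts ▸ hpw), htalen]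
      have hBstep : solutionAltStep k (d, tot, i) city
          = (d.insert c i, tot + (if (decide ((a.length : Int) < k)) then (1:Int) else 5), i + 1) := by
        simp only [solutionAltStep, ← hc, hget, hrank]
      -- the ghost invariant after the access, shared by hit and miss
      have hcontains : d.contains c = true := by
        rw [PySem.Dict.contains_eq_isSome_get?, hget]; rfl
      have hperm' : (d.insert c i).items.Perm ((c :: (a ++ b)).zip (i :: (ta ++ tb))) := by
        have hitems : (d.insert c i).items
            = d.items.map (fun p => if p.1 == c then (c, i) else p) := by
          simp [PySem.Dict.insert, hcontains]
        rw [hitems, List.zip_cons_cons, List.zip_append htalen.symm]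
        have h := hperm.map (fun p => if p.1 == c then (c, i) else p)
        have hmapa : (a.zip ta).map (fun p => if p.1 == c then (c, i) else p) = a.zip ta := by
          rw [List.map_congr_left (g := id), List.map_id]
          intro p hp
          obtain ⟨x, y⟩ := p
          have hx : x ∈ a := (List.of_mem_zip hp).1
          simp only [id]
          rw [if_neg]
          simp only [beq_iff_eq]
          exact fun hxe => hca (hxe ▸ hx)
        have hmapb : (b.zip tb).map (fun p => if p.1 == c then (c, i) else p) = b.zip tb := by
          rw [List.map_congr_left (g := id), List.map_id]
          intro p hp
          obtain ⟨x, y⟩ := p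
          have hx : x ∈ b := (List.of_mem_zip hp).1
          simp only [id]
          rw [if_neg]
          simp only [beq_iff_eq]
          exact fun hxe => hcb (hxe ▸ hx)
        rw [hzip] at h
        rw [List.map_append, List.map_cons, hmapa, hmapb] at h
        simp only [beq_self_eq_true, if_pos] at h
        exact h.trans List.perm_middle
      have hmemts : ∀ t ∈ ta ++ tb, t ∈ ts := by
        intro t htm
        rw [hts]
        rcases List.mem_append.mp htm with h | h
        · exact List.mem_append.mpr (Or.inl h)
        · exact List.mem_append.mpr (Or.inr (List.mem_cons_of_mem _ h))
      have hpw' : (i :: (ta ++ tb)).Pairwise (· > ·) := by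
        rw [List.pairwise_cons]
        constructor
        · exact fun t htm => hlt t (hmemts t htm)
        · exact List.Pairwise.sublist ((List.sublist_cons_self j tb).append_left ta) (hts ▸ hpw)
      have hlt' : ∀ t ∈ (i :: (ta ++ tb)), t < i + 1 := by
        intro t htm
        rcases List.mem_cons.mp htm with rfl | h
        · omega
        · have := hlt t (hmemts t h); omega
      have hlen' : (c :: (a ++ b)).length = (i :: (ta ++ tb)).length := by
        simp; omega
      have hint : (a.length : Int) < k ↔ a.length < k.toNat := by omega
      by_cases hhit : a.length < k.toNat
      · -- hit: c is inside the window
        have hAstep : solutionStep k (((a ++ c :: b).take k.toNat).reverse, tot) city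
            = (((c :: (a ++ b)).take k.toNat).reverse, tot + 1) := by
          simp only [solutionStep, ← hc]
          rw [if_pos (by rw [List.mem_reverse]; exact (mem_take_append_iff a b c hca _).mpr hhit)]
          rw [hitUpdate_eq k hk a b c hca hcb hhit]
        rw [hAstep, hBstep]
        rw [if_pos (by simpa using hint.mpr hhit)]
        exact ih (c :: (a ++ b)) (i :: (ta ++ tb)) (d.insert c i) (tot + 1) (i + 1)
          hperm' hlen' hnd' hpw' hlt'
      · -- miss although seen: c fell outside the window
        have hAstep : solutionStep k (((a ++ c :: b).take k.toNat).reverse, tot) city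
            = (((c :: (a ++ b)).take k.toNat).reverse, tot + 5) := by
          simp only [solutionStep, ← hc]
          rw [if_neg (by rw [List.mem_reverse]; exact fun h => hhit ((mem_take_append_iff a b c hca _).mp h))]
          rw [appendMax_eq k hk (a ++ c :: b) c]
          congr 2
          rcases Nat.eq_zero_or_pos k.toNat with h0 | hpos
          · rw [h0]; rfl
          · obtain ⟨n, hn⟩ := Nat.exists_eq_succ_of_ne_zero (show k.toNat ≠ 0 by omega)
            rw [hn, List.take_succ_cons, List.take_succ_cons]
            rw [List.take_append_of_le_length (by omega), List.take_append_of_le_length (by omega)]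
        rw [hAstep, hBstep]
        rw [if_neg (by simp; omega)]
        exact ih (c :: (a ++ b)) (i :: (ta ++ tb)) (d.insert c i) (tot + 5) (i + 1)
          hperm' hlen' hnd' hpw' hlt'
    · -- first access of c: a miss, c gets a fresh entry
      have hget : d.get? c = none := by
        rw [PySem.Dict.get?_eq_none_iff_not_mem_keys]
        exact fun h => hcr (hkeys.mem_iff.mp h)
      have hcontains : d.contains c = false := by
        rw [PySem.Dict.contains_eq_isSome_get?, hget]; rfl
      have hAstep : solutionStep k ((r.take k.toNat).reverse, tot) city
          = (((c :: r).take k.toNat).reverse, tot + 5) := by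
        simp only [solutionStep, ← hc]
        rw [if_neg (by rw [List.mem_reverse]; exact fun h => hcr (List.mem_of_mem_take h))]
        rw [appendMax_eq k hk r c]
      have hBstep : solutionAltStep k (d, tot, i) city = (d.insert c i, tot + 5, i + 1) := by
        simp only [solutionAltStep, ← hc, hget]
        norm_num
      rw [hAstep, hBstep]
      have hperm' : (d.insert c i).items.Perm ((c :: r).zip (i :: ts)) := by
        have hitems : (d.insert c i).items = d.items ++ [(c, i)] := by
          simp [PySem.Dict.insert, hcontains]
        rw [hitems, List.zip_cons_cons]
        exact (List.perm_append_singleton _ _).trans (hperm.cons _)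
      exact ih (c :: r) (i :: ts) (d.insert c i) (tot + 5) (i + 1)
        hperm'
        (by simp [hlen])
        (List.nodup_cons.mpr ⟨hcr, hnd⟩)
        (List.pairwise_cons.mpr ⟨fun t ht => hlt t ht, hpw⟩)
        (by
          intro t htm
          rcases List.mem_cons.mp htm with rfl | h
          · omega
          · have := hlt t h
            omega)

-- ===== VERDICT (by name: the statement is the Claim_ definition above) =====
theorem solution_spec : Claim_equal_solution := by
  intro k cities _ hpre
  unfold Spec_solution solution solution_alt
  have h := loop_eq k hpre cities [] [] (PySem.Dict.mk []) 0 0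
    (by simp) (by simp) (by simp) (by simp) (by simp)
  simpa using h
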